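-- pv_equiv track=rewrite | github.com/zeetee1235/rpl-structural-attack-observability | scripts/extract_parent_stats_batch.py | build_intervals
-- ===== SOURCE A (Python) =====
-- def build_intervals(events, end_ts):
--     intervals = []
--     for node, evs in events.items():
--         evs.sort(key=lambda x: x[0])
--         coalesced = []
--         for ts, parent in evs:
--             if not coalesced or coalesced[-1][1] != parent:
--                 coalesced.append((ts, parent))
--         for i, (ts, parent) in enumerate(coalesced):
--             t_end = coalesced[i + 1][0] if i + 1 < len(coalesced) else end_ts
--             if t_end < ts:
--                 continue
--             intervals.append((node, parent, ts, t_end, t_end - ts))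
--     return intervals
-- ===== SOURCE B (Python) =====
-- def build_intervals(events, end_ts):
--     # Single streaming pass per node (no intermediate coalesced list);
--     # like A, sorts each evs list in place.
--     intervals = []
--     for node, evs in events.items():
--         evs.sort(key=lambda x: x[0])
--         if not evs:
--             continue
--         cur_ts, cur_parent = evs[0]
--         for ts, parent in evs[1:]:
--             if parent != cur_parent:
--                 intervals.append((node, cur_parent, cur_ts, ts, ts - cur_ts))
--                 cur_ts, cur_parent = ts, parent
--         if end_ts >= cur_ts:
--             intervals.append((node, cur_parent, cur_ts, end_ts, end_ts - cur_ts))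
--     return intervals
-- ===== Notes on version B (the rewrite author's own statement) =====
-- stated objective: simpler
-- what changed: Per node, A builds an intermediate coalesced list and then makes a second indexed pass with lookahead (coalesced[i+1]); B does one streaming pass holding only the current run's start timestamp and parent, emitting an interval whenever the parent changes and once at end_ts.
import Mathlib
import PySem

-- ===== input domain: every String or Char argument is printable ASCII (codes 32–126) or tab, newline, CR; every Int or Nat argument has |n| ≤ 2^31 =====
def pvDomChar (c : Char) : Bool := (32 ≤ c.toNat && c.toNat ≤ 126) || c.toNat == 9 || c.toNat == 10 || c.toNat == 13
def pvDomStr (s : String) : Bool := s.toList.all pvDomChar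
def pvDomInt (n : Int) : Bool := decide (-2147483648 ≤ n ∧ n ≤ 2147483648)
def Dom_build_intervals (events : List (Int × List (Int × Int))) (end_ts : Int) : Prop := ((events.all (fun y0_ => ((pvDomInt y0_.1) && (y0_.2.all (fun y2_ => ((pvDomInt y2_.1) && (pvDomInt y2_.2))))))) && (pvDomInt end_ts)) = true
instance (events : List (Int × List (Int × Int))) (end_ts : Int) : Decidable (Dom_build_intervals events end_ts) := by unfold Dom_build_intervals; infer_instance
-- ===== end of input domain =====

-- B replaces A's coalesce-then-index two-pass per node with one streaming state pass (same in-place sort of each evs list; return-value equivalence).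


-- ===== PORT A =====
-- the fold body of A's coalescing loop ('if not coalesced or coalesced[-1][1] != parent: coalesced.append(...)')
def coStep (co : List (Int × Int)) (e : Int × Int) : List (Int × Int) :=
  match co.getLast? with
  | none => co ++ [e]
  | some last => if last.2 ≠ e.2 then co ++ [e] else co

def build_intervals (events : List (Int × List (Int × Int))) (end_ts : Int) : List (Int × Int × Int × Int × Int) :=
  events.foldl (fun intervals ne =>
    let node := ne.1
    let evs := PySem.List.sorted ne.2 (fun x => x.1) false
    let coalesced := evs.foldl coStep []
    (PySem.List.enumerate coalesced 0).foldl (fun acc ie =>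
      let i := ie.1
      let ts := ie.2.1
      let parent := ie.2.2
      let t_end := if i + 1 < (coalesced.length : Int) then (PySem.List.pyGetD coalesced (i + 1) (0, 0)).1 else end_ts
      if t_end < ts then acc else acc ++ [(node, parent, ts, t_end, t_end - ts)]) intervals) []

-- ===== PORT B =====
def biStream (node : Int) (end_ts : Int) (ct : Int) (cp : Int) : List (Int × Int) → List (Int × Int × Int × Int × Int)
  | [] => if end_ts ≥ ct then [(node, cp, ct, end_ts, end_ts - ct)] else []
  | (ts, p) :: rest =>
      if p ≠ cp then (node, cp, ct, ts, ts - ct) :: biStream node end_ts ts p rest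
      else biStream node end_ts ct cp rest

def build_intervals_alt (events : List (Int × List (Int × Int))) (end_ts : Int) : List (Int × Int × Int × Int × Int) :=
  events.foldl (fun intervals ne =>
    match PySem.List.sorted ne.2 (fun x => x.1) false with
    | [] => intervals
    | (ts0, p0) :: rest => intervals ++ biStream ne.1 end_ts ts0 p0 rest) []

-- ===== PRECONDITION & SPEC =====
def Spec_build_intervals (events : List (Int × List (Int × Int))) (end_ts : Int) (out : List (Int × Int × Int × Int × Int)) : Prop := out = build_intervals_alt events end_ts
instance (events : List (Int × List (Int × Int))) (end_ts : Int) (out : List (Int × Int × Int × Int × Int)) : Decidable (Spec_build_intervals events end_ts out) := by unfold Spec_build_intervals; infer_instance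

-- ===== CLAIM (what is proved, stated in full; the proofs are below) =====
def Claim_equal_build_intervals : Prop := ∀ (events : List (Int × List (Int × Int))) (end_ts : Int), Dom_build_intervals events end_ts → Spec_build_intervals events end_ts (build_intervals events end_ts)

-- ===== LEMMAS AND PROOFS =====

-- recursive form of A's coalescing fold (run-compression on the parent component)
def coRun (p : Int) : List (Int × Int) → List (Int × Int)
  | [] => []
  | (ts, q) :: rest => if q = p then coRun p rest else (ts, q) :: coRun q rest

-- the per-element output of A's second (enumerate/index) pass
def gA (c : List (Int × Int)) (node end_ts : Int) (ie : Int × (Int × Int)) : List (Int × Int × Int × Int × Int) :=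
  let t_end := if ie.1 + 1 < (c.length : Int) then (PySem.List.pyGetD c (ie.1 + 1) (0, 0)).1 else end_ts
  if t_end < ie.2.1 then [] else [(node, ie.2.2, ie.2.1, t_end, t_end - ie.2.1)]

-- recursive form of A's second pass
def pairs (node : Int) (end_ts : Int) : List (Int × Int) → List (Int × Int × Int × Int × Int)
  | [] => []
  | (ts, p) :: rest =>
      (match rest with
       | [] => if end_ts < ts then [] else [(node, p, ts, end_ts, end_ts - ts)]
       | (ts', _) :: _ => if ts' < ts then [] else [(node, p, ts, ts', ts' - ts)]) ++ pairs node end_ts rest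

lemma foldl_coStep (rest : List (Int × Int)) : ∀ (acc : List (Int × Int)) (e : Int × Int),
    rest.foldl coStep (acc ++ [e]) = acc ++ [e] ++ coRun e.2 rest := by
  induction rest with
  | nil => intro acc e; simp [coRun]
  | cons hd tl ih =>
      intro acc e
      obtain ⟨ts, q⟩ := hd
      have hstep : coStep (acc ++ [e]) (ts, q) =
          if q = e.2 then acc ++ [e] else (acc ++ [e]) ++ [(ts, q)] := by
        by_cases h : q = e.2
        · simp [coStep, h]
        · simp [coStep, h, Ne.symm h]
      by_cases h : q = e.2
      · simp only [List.foldl_cons, hstep, if_pos h, coRun, ih]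
      · simp only [List.foldl_cons, hstep, if_neg h, coRun]
        rw [ih (acc ++ [e]) (ts, q)]
        simp

lemma coalesce_eq_coRun (s : List (Int × Int)) :
    s.foldl coStep [] = match s with
      | [] => []
      | e :: rest => e :: coRun e.2 rest := by
  cases s with
  | nil => rfl
  | cons e rest =>
      have h0 : coStep [] e = [] ++ [e] := by simp [coStep]
      rw [List.foldl_cons, h0, foldl_coStep rest [] e]
      simp

-- index shift: an element at enumerate-index s+1 of e :: c sees the same lookahead as index s of c
lemma gA_shift (e : Int × Int) (c : List (Int × Int)) (node end_ts : Int) (s : Int) (hs : 0 ≤ s) (x : Int × Int) :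
    gA (e :: c) node end_ts (s + 1, x) = gA c node end_ts (s, x) := by
  unfold gA
  have hlen : (s + 1 + 1 < ((e :: c).length : Int)) ↔ (s + 1 < (c.length : Int)) := by
    push_cast [List.length_cons]; omega
  by_cases h : s + 1 < (c.length : Int)
  · have h1 : (0 : Int) ≤ s + 1 := by omega
    have h2 : (0 : Int) ≤ s + 1 + 1 := by omega
    rw [PySem.List.pyGetD_of_nonneg _ _ h1, PySem.List.pyGetD_of_nonneg _ _ h2]
    have ht : (s + 1 + 1).toNat = (s + 1).toNat + 1 := by omega
    simp [ht, h, List.getD]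
  · rw [if_neg (fun hh => h (hlen.mp hh)), if_neg h]

lemma flatMap_enum_succ (f g : Int × (Int × Int) → List (Int × Int × Int × Int × Int))
    (h : ∀ (i : Int) (x : Int × Int), 0 ≤ i → g (i, x) = f (i + 1, x)) :
    ∀ (c : List (Int × Int)) (s : Int), 0 ≤ s →
    (PySem.List.enumerate c (s + 1)).flatMap f = (PySem.List.enumerate c s).flatMap g := by
  intro c
  induction c with
  | nil => intro s _; simp [PySem.List.enumerate]
  | cons x tl ih =>
      intro s hs
      rw [PySem.List.enumerate_cons, PySem.List.enumerate_cons]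
      simp only [List.flatMap_cons]
      rw [h s x hs, ih (s + 1) (by omega)]

-- A's second pass as flatMap over the enumerate equals the recursive pairing
lemma flatMap_gA_eq_pairs (node end_ts : Int) :
    ∀ (c : List (Int × Int)),
    (PySem.List.enumerate c 0).flatMap (gA c node end_ts) = pairs node end_ts c := by
  intro c
  induction c with
  | nil => simp [PySem.List.enumerate, pairs]
  | cons e tl ih =>
      obtain ⟨ts, p⟩ := e
      rw [PySem.List.enumerate_cons]
      simp only [List.flatMap_cons, zero_add]
      have hshift : (PySem.List.enumerate tl (0 + 1)).flatMap (gA ((ts, p) :: tl) node end_ts)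
          = (PySem.List.enumerate tl 0).flatMap (gA tl node end_ts) := by
        refine flatMap_enum_succ _ _ (fun i x hi => (gA_shift (ts, p) tl node end_ts i hi x).symm) tl 0 (by omega)
      rw [show (0 : Int) + 1 = 1 from rfl] at hshift
      rw [hshift, ih]
      clear hshift ih
      cases tl with
      | nil =>
          have hl : ¬ ((0 : Int) + 1 < (([(ts, p)] : List (Int × Int)).length : Int)) := by
            simp
          simp only [gA, hl, pairs]
          rfl
      | cons f tf =>
          obtain ⟨ts', p'⟩ := f
          have hl : ((0 : Int) + 1 < (((ts, p) :: (ts', p') :: tf).length : Int)) := by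
            push_cast [List.length_cons]; omega
          have hget : PySem.List.pyGetD ((ts, p) :: (ts', p') :: tf) (0 + 1) (0, 0) = (ts', p') := by
            rw [PySem.List.pyGetD_of_nonneg _ _ (by omega : (0:Int) ≤ 0 + 1)]
            simp [List.getD]
          simp only [gA, hl, hget, pairs]
          rfl

-- streaming pass equals pairs of the coalesced run, under sortedness
lemma biStream_eq_pairs (node end_ts : Int) : ∀ (rest : List (Int × Int)) (ct cp : Int),
    (∀ x ∈ rest, ct ≤ x.1) → rest.Pairwise (fun a b => a.1 ≤ b.1) →
    biStream node end_ts ct cp rest = pairs node end_ts ((ct, cp) :: coRun cp rest) := by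
  intro rest
  induction rest with
  | nil =>
      intro ct cp _ _
      by_cases h : end_ts < ct
      · simp [biStream, pairs, coRun, h, show ¬ end_ts ≥ ct by omega]
      · simp [biStream, pairs, coRun, h, show end_ts ≥ ct by omega]
  | cons hd tl ih =>
      intro ct cp hle hpw
      obtain ⟨ts, p⟩ := hd
      have hts : ct ≤ ts := hle (ts, p) (by simp)
      have hpw' : tl.Pairwise (fun a b => a.1 ≤ b.1) := hpw.of_cons
      by_cases h : p = cp
      · have hb : biStream node end_ts ct cp ((ts, p) :: tl) = biStream node end_ts ct cp tl := by
          simp [biStream, h]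
        rw [hb, show coRun cp ((ts, p) :: tl) = coRun cp tl by simp [coRun, h]]
        exact ih ct cp (fun x hx => hle x (by simp [hx])) hpw'
      · have hb : biStream node end_ts ct cp ((ts, p) :: tl) =
            (node, cp, ct, ts, ts - ct) :: biStream node end_ts ts p tl := by
          simp [biStream, h]
        have hco : coRun cp ((ts, p) :: tl) = (ts, p) :: coRun p tl := by simp [coRun, h]
        have hle' : ∀ x ∈ tl, ts ≤ x.1 := by
          intro x hx
          exact (List.pairwise_cons.mp hpw).1 x hx
        rw [hb, hco, ih ts p hle' hpw']
        have hnl : ¬ ts < ct := by omega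
        simp [pairs, hnl]

-- sortedness facts about the sorted list, packaged for the per-node argument
lemma sorted_head_le (l : List (Int × Int)) (ts0 : Int) (p0 : Int) (rest : List (Int × Int))
    (h : PySem.List.sorted l (fun x => x.1) false = (ts0, p0) :: rest) :
    (∀ x ∈ rest, ts0 ≤ x.1) ∧ rest.Pairwise (fun a b => a.1 ≤ b.1) := by
  have hp := PySem.List.sorted_pairwise l (fun x => x.1)
  rw [h] at hp
  have := List.pairwise_cons.mp hp
  exact ⟨this.1, this.2⟩

-- per-node equality of the two inner computations
lemma per_node (node end_ts : Int) (l : List (Int × Int)) (intervals : List (Int × Int × Int × Int × Int)) :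
    (let evs := PySem.List.sorted l (fun x => x.1) false
     let coalesced := evs.foldl coStep []
     (PySem.List.enumerate coalesced 0).foldl (fun acc ie =>
       let i := ie.1
       let ts := ie.2.1
       let parent := ie.2.2
       let t_end := if i + 1 < (coalesced.length : Int) then (PySem.List.pyGetD coalesced (i + 1) (0, 0)).1 else end_ts
       if t_end < ts then acc else acc ++ [(node, parent, ts, t_end, t_end - ts)]) intervals)
    = (match PySem.List.sorted l (fun x => x.1) false with
       | [] => intervals
       | (ts0, p0) :: rest => intervals ++ biStream node end_ts ts0 p0 rest) := by
  simp only []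
  set s := PySem.List.sorted l (fun x => x.1) false with hs
  set c := s.foldl coStep [] with hc
  have hfold : (PySem.List.enumerate c 0).foldl (fun acc ie =>
      let i := ie.1
      let ts := ie.2.1
      let parent := ie.2.2
      let t_end := if i + 1 < (c.length : Int) then (PySem.List.pyGetD c (i + 1) (0, 0)).1 else end_ts
      if t_end < ts then acc else acc ++ [(node, parent, ts, t_end, t_end - ts)]) intervals
      = intervals ++ (PySem.List.enumerate c 0).flatMap (gA c node end_ts) := by
    rw [← PySem.List.foldl_append_eq_flatMap (gA c node end_ts) (PySem.List.enumerate c 0) intervals]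
    refine PySem.List.foldl_congr_mem _ _ _ _ ?_
    intro acc ie _
    simp only [gA]
    by_cases hcond : (if ie.1 + 1 < (c.length : Int) then (PySem.List.pyGetD c (ie.1 + 1) (0, 0)).1 else end_ts) < ie.2.1 <;>
      simp [hcond]
  rw [hfold, flatMap_gA_eq_pairs]
  cases hsc : s with
  | nil => rw [hc, hsc]; simp [pairs]
  | cons e rest =>
      obtain ⟨ts0, p0⟩ := e
      have hcor : c = (ts0, p0) :: coRun p0 rest := by
        rw [hc, hsc]; simpa using coalesce_eq_coRun ((ts0, p0) :: rest)
      obtain ⟨h1, h2⟩ := sorted_head_le l ts0 p0 rest (hs ▸ hsc)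
      rw [hcor, ← biStream_eq_pairs node end_ts rest ts0 p0 h1 h2]

-- ===== VERDICT (by name: the statement is the Claim_ definition above) =====
theorem build_intervals_spec : Claim_equal_build_intervals := by
  intro events end_ts hdom
  clear hdom
  unfold Spec_build_intervals build_intervals build_intervals_alt
  induction events using List.reverseRecOn with
  | nil => rfl
  | append_singleton init ne ih =>
      rw [List.foldl_append, List.foldl_append, ih]
      simp only [List.foldl_cons, List.foldl_nil]
      exact per_node ne.1 end_ts ne.2 _
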